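-- pv_equiv track=rewrite | github.com/mrhenrike/WordListsForHacking | wfh_modules/ml_patterns.py | abstract_password
-- ===== SOURCE A (Python) =====
-- def abstract_password(val: str) -> str:
--     """
--     Convert a password to its abstract character-class pattern.
--
--     Structural tokens:
--         U = uppercase alpha run
--         L = lowercase alpha run
--         D = digit run
--         S = special/symbol run
--         X = other
--
--     Examples:
--         Senha@2024      → ULSUUD → compacted: ULS@D
--         empresa123      → LD
--         P@ssw0rd        → ULSLDL
--         Password1!      → ULLDUS
--
--     Args:
--         val: Raw password string.
--
--     Returns:
--         Abstract structural pattern string.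
--     """
--     result: list[str] = []
--     i = 0
--     while i < len(val):
--         c = val[i]
--         if c.isupper():
--             j = i
--             while j < len(val) and val[j].isupper():
--                 j += 1
--             result.append("U")
--             i = j
--         elif c.islower():
--             j = i
--             while j < len(val) and val[j].islower():
--                 j += 1
--             result.append("L")
--             i = j
--         elif c.isdigit():
--             j = i
--             while j < len(val) and val[j].isdigit():
--                 j += 1
--             result.append("D")
--             i = j
--         elif c in ("@", "!", "#", "$", "%", "&", "*", "+", "=", "?", "^", "~"):
--             result.append("S")
--             i += 1
--         else:
--             result.append("X")
--             i += 1
--     return "".join(result)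
-- ===== SOURCE B (Python) =====
-- def abstract_password(val: str) -> str:
--     specials = "@!#$%&*+=?^~"
--     out = []
--     for c in val:
--         if c.isupper():
--             k = "U"
--         elif c.islower():
--             k = "L"
--         elif c.isdigit():
--             k = "D"
--         elif c in specials:
--             k = "S"
--         else:
--             k = "X"
--         if k in "ULD" and out and out[-1] == k:
--             continue
--         out.append(k)
--     return "".join(out)
-- ===== Notes on version B (the rewrite author's own statement) =====
-- stated objective: simpler
-- what changed: Replaces the index-based outer loop with nested run-scanning inner loops by a single pass that classifies each character and appends its class, skipping a U/L/D class equal to the last emitted token.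
import Mathlib
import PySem

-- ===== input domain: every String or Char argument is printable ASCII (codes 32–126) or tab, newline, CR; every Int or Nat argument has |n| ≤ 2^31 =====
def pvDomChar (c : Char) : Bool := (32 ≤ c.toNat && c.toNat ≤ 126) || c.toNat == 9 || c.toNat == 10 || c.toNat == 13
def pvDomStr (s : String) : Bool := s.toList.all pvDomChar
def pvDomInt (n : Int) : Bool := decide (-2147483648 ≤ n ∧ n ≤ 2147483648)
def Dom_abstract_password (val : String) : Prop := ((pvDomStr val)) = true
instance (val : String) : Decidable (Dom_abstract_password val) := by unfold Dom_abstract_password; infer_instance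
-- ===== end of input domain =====

-- B replaces A's nested run-scanning loops by one pass that classifies each character and
-- skips a U/L/D class equal to the last emitted token (objective: simpler).

-- ===== PORT A =====
-- A's special-symbol tuple
def pvSpecials : List Char := ['@', '!', '#', '$', '%', '&', '*', '+', '=', '?', '^', '~']

-- A's while loop: on a class hit the inner while advances j past the run (dropWhile), else one char.
def pvGoA : List Char → List Char
  | [] => []
  | c :: rest =>
    if PySem.Chars.isupper c then
      'U' :: pvGoA (rest.dropWhile PySem.Chars.isupper)
    else if PySem.Chars.islower c then
      'L' :: pvGoA (rest.dropWhile PySem.Chars.islower)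
    else if PySem.Chars.isdigit c then
      'D' :: pvGoA (rest.dropWhile PySem.Chars.isdigit)
    else if pvSpecials.contains c then
      'S' :: pvGoA rest
    else
      'X' :: pvGoA rest
  termination_by l => l.length
  decreasing_by
  · exact Nat.lt_succ_of_le (List.length_dropWhile_le _ _)
  · exact Nat.lt_succ_of_le (List.length_dropWhile_le _ _)
  · exact Nat.lt_succ_of_le (List.length_dropWhile_le _ _)
  · simp
  · simp

def abstract_password (val : String) : String := String.ofList (pvGoA val.toList)

-- ===== PORT B =====
-- per-character classifier (same check order as A)
def pvCls (c : Char) : Char :=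
  if PySem.Chars.isupper c then 'U'
  else if PySem.Chars.islower c then 'L'
  else if PySem.Chars.isdigit c then 'D'
  else if pvSpecials.contains c then 'S'
  else 'X'

-- B's loop: out is kept reversed, out.head? is Python's out[-1]
def pvStepB (out : List Char) (c : Char) : List Char :=
  let k := pvCls c
  if (k = 'U' ∨ k = 'L' ∨ k = 'D') ∧ out.head? = some k then out else k :: out

def abstract_password_alt (val : String) : String :=
  String.ofList (val.toList.foldl pvStepB []).reverse

-- ===== PRECONDITION & SPEC =====
def Spec_abstract_password (val : String) (out : String) : Prop := out = abstract_password_alt val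
instance (val : String) (out : String) : Decidable (Spec_abstract_password val out) := by unfold Spec_abstract_password; infer_instance

-- ===== CLAIM (what is proved, stated in full; the proofs are below) =====
def Claim_equal_abstract_password : Prop := ∀ (val : String), Dom_abstract_password val → Spec_abstract_password val (abstract_password val)

-- ===== LEMMAS AND PROOFS =====

-- recursive characterisation of B's fold, threading the last emitted token
def pvDed (prev : Option Char) : List Char → List Char
  | [] => []
  | c :: rest =>
    let k := pvCls c
    if (k = 'U' ∨ k = 'L' ∨ k = 'D') ∧ prev = some k then pvDed prev rest
    else k :: pvDed (some k) rest

theorem pvFold_eq_ded (l : List Char) : ∀ out : List Char,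
    l.foldl pvStepB out = (pvDed out.head? l).reverse ++ out := by
  induction l with
  | nil => intro out; simp [pvDed]
  | cons c rest ih =>
    intro out
    simp only [List.foldl_cons, pvStepB, pvDed]
    split_ifs with h
    · rw [ih]
    · rw [ih]; simp

theorem pvClsU_iff (c : Char) : pvCls c = 'U' ↔ PySem.Chars.isupper c = true := by
  unfold pvCls
  split_ifs with h1 h2 h3 h4 <;> simp_all

theorem pvClsL_iff (c : Char) : pvCls c = 'L' ↔ PySem.Chars.islower c = true := by
  have hd : PySem.Chars.islower c = true → PySem.Chars.isupper c = false := by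
    simp [PySem.Chars.isupper, PySem.Chars.islower, Char.le_def, UInt32.le_iff_toNat_le]
    intro h1 h2 h3; omega
  unfold pvCls
  split_ifs with h1 h2 h3 h4 <;> simp_all

theorem pvClsD_iff (c : Char) : pvCls c = 'D' ↔ PySem.Chars.isdigit c = true := by
  have hd1 : PySem.Chars.isdigit c = true → PySem.Chars.isupper c = false := by
    simp [PySem.Chars.isupper, PySem.Chars.isdigit, Char.le_def, UInt32.le_iff_toNat_le]
    intro h1 h2 h3; omega
  have hd2 : PySem.Chars.isdigit c = true → PySem.Chars.islower c = false := by
    simp [PySem.Chars.islower, PySem.Chars.isdigit, Char.le_def, UInt32.le_iff_toNat_le]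
    intro h1 h2 h3; omega
  unfold pvCls
  split_ifs with h1 h2 h3 h4 <;> simp_all

-- unfolding pvDed on a cons whose head cannot be skipped
theorem pvDed_cons_noskip (prev : Option Char) (c : Char) (rest : List Char)
    (h : ¬((pvCls c = 'U' ∨ pvCls c = 'L' ∨ pvCls c = 'D') ∧ prev = some (pvCls c))) :
    pvDed prev (c :: rest) = pvCls c :: pvDed (some (pvCls c)) rest := by
  rw [pvDed, if_neg h]

-- leading characters of class k are skipped by pvDed with prev = some k
theorem pvDed_dropWhile (p : Char → Bool) (k : Char)
    (hk : k = 'U' ∨ k = 'L' ∨ k = 'D')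
    (hp : ∀ c, p c = true → pvCls c = k) :
    ∀ l : List Char, pvDed (some k) l = pvDed (some k) (l.dropWhile p) := by
  intro l
  induction l with
  | nil => rfl
  | cons c rest ih =>
    by_cases hc : p c = true
    · rw [List.dropWhile_cons_of_pos hc, ← ih]
      have hck := hp c hc
      rw [pvDed, if_pos ⟨by rw [hck]; exact hk, by rw [hck]⟩]
    · rw [List.dropWhile_cons_of_neg hc]

-- after dropWhile p, the head's class is not k (when p captures class k exactly)
theorem pvNoSkip_dropWhile (p : Char → Bool) (k : Char)
    (hp : ∀ c, pvCls c = k → p c = true) (l : List Char) :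
    ∀ c, (l.dropWhile p).head? = some c → pvCls c ≠ k := by
  intro c hc hk
  have hd := List.head?_dropWhile_not p l
  rw [hc] at hd
  simp at hd
  exact absurd (hp c hk) (by simp [hd])

-- main invariant: pvGoA equals pvDed for any prev the head cannot be merged into
theorem pvGoA_eq_ded : ∀ l : List Char, ∀ prev : Option Char,
    (∀ c, l.head? = some c → ¬((pvCls c = 'U' ∨ pvCls c = 'L' ∨ pvCls c = 'D') ∧ prev = some (pvCls c))) →
    pvGoA l = pvDed prev l := by
  intro l
  induction l using pvGoA.induct with
  | case1 => intro prev _; simp [pvGoA, pvDed]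
  | case2 c rest h ih =>
    intro prev hpre
    have hk : pvCls c = 'U' := (pvClsU_iff c).mpr h
    rw [pvGoA, if_pos h, pvDed_cons_noskip prev c rest (hpre c rfl), hk]
    rw [pvDed_dropWhile PySem.Chars.isupper 'U' (Or.inl rfl) (fun d hd => (pvClsU_iff d).mpr hd) rest]
    congr 1
    apply ih
    intro d hd hcon
    have hne := pvNoSkip_dropWhile PySem.Chars.isupper 'U' (fun d hd => (pvClsU_iff d).mp hd) rest d hd
    exact hne (Option.some.inj hcon.2).symm
  | case3 c rest h1 h ih =>
    intro prev hpre
    have hk : pvCls c = 'L' := (pvClsL_iff c).mpr h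
    rw [pvGoA, if_neg h1, if_pos h, pvDed_cons_noskip prev c rest (hpre c rfl), hk]
    rw [pvDed_dropWhile PySem.Chars.islower 'L' (Or.inr (Or.inl rfl)) (fun d hd => (pvClsL_iff d).mpr hd) rest]
    congr 1
    apply ih
    intro d hd hcon
    have hne := pvNoSkip_dropWhile PySem.Chars.islower 'L' (fun d hd => (pvClsL_iff d).mp hd) rest d hd
    exact hne (Option.some.inj hcon.2).symm
  | case4 c rest h1 h2 h ih =>
    intro prev hpre
    have hk : pvCls c = 'D' := (pvClsD_iff c).mpr h
    rw [pvGoA, if_neg h1, if_neg h2, if_pos h, pvDed_cons_noskip prev c rest (hpre c rfl), hk]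
    rw [pvDed_dropWhile PySem.Chars.isdigit 'D' (Or.inr (Or.inr rfl)) (fun d hd => (pvClsD_iff d).mpr hd) rest]
    congr 1
    apply ih
    intro d hd hcon
    have hne := pvNoSkip_dropWhile PySem.Chars.isdigit 'D' (fun d hd => (pvClsD_iff d).mp hd) rest d hd
    exact hne (Option.some.inj hcon.2).symm
  | case5 c rest h1 h2 h3 h ih =>
    intro prev hpre
    have hm : c ∈ pvSpecials := by simpa using h
    have hk : pvCls c = 'S' := by simp [pvCls, h1, h2, h3, hm]
    rw [pvGoA, if_neg h1, if_neg h2, if_neg h3, if_pos h,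
       pvDed_cons_noskip prev c rest (by rw [hk]; rintro ⟨hin, -⟩; rcases hin with h' | h' | h' <;> exact absurd h' (by decide)), hk]
    congr 1
    apply ih
    intro d hd hcon
    have : pvCls d = 'S' := (Option.some.inj hcon.2).symm
    rcases hcon.1 with h' | h' | h' <;> rw [this] at h' <;> exact absurd h' (by decide)
  | case6 c rest h1 h2 h3 h ih =>
    intro prev hpre
    have hm : c ∉ pvSpecials := by simpa using h
    have hk : pvCls c = 'X' := by simp [pvCls, h1, h2, h3, hm]
    rw [pvGoA, if_neg h1, if_neg h2, if_neg h3, if_neg h,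
       pvDed_cons_noskip prev c rest (by rw [hk]; rintro ⟨hin, -⟩; rcases hin with h' | h' | h' <;> exact absurd h' (by decide)), hk]
    congr 1
    apply ih
    intro d hd hcon
    have : pvCls d = 'X' := (Option.some.inj hcon.2).symm
    rcases hcon.1 with h' | h' | h' <;> rw [this] at h' <;> exact absurd h' (by decide)

-- ===== VERDICT (by name: the statement is the Claim_ definition above) =====
theorem abstract_password_spec : Claim_equal_abstract_password := by
  intro val _
  unfold Spec_abstract_password abstract_password abstract_password_alt
  rw [pvFold_eq_ded]
  simp only [List.head?_nil, List.append_nil, List.reverse_reverse]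
  congr 1
  exact pvGoA_eq_ded val.toList none (by simp)
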